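-- pv_equiv track=rewrite | github.com/vATCSCC/PERTI | scripts/generate_historical_changelog.py | diff_procs
-- ===== SOURCE A (Python) =====
-- def diff_procs(old, new, typ):
--     """Diff procedure data (dps/stars)."""
--     changes = []
--
--     for k in sorted(set(old) & set(new)):
--         if sorted(old[k]) != sorted(new[k]):
--             changes.append({
--                 'type': typ, 'name': k, 'action': 'changed',
--                 'detail': 'Content modified', 'old_name': k,
--                 'new_value': k
--             })
--
--     for k in sorted(set(old) - set(new)):
--         changes.append({
--             'type': typ, 'name': k, 'action': 'removed',
--             'detail': 'No longer in NASR source', 'old_name': k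
--         })
--
--     for k in sorted(set(new) - set(old)):
--         changes.append({
--             'type': typ, 'name': k, 'action': 'added',
--             'detail': 'New procedure'
--         })
--
--     return changes
-- ===== SOURCE B (Python) =====
-- def diff_procs(old, new, typ):
--     """Diff procedure data by a two-pointer merge walk over the two sorted key lists."""
--     ok, nk = sorted(old), sorted(new)
--     changed, removed, added = [], [], []
--     i = j = 0
--     while i < len(ok) and j < len(nk):
--         a, b = ok[i], nk[j]
--         if a == b:
--             if sorted(old[a]) != sorted(new[a]):
--                 changed.append({
--                     'type': typ, 'name': a, 'action': 'changed',
--                     'detail': 'Content modified', 'old_name': a,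
--                     'new_value': a
--                 })
--             i += 1
--             j += 1
--         elif a < b:
--             removed.append({
--                 'type': typ, 'name': a, 'action': 'removed',
--                 'detail': 'No longer in NASR source', 'old_name': a
--             })
--             i += 1
--         else:
--             added.append({
--                 'type': typ, 'name': b, 'action': 'added',
--                 'detail': 'New procedure'
--             })
--             j += 1
--     removed.extend({
--         'type': typ, 'name': k, 'action': 'removed',
--         'detail': 'No longer in NASR source', 'old_name': k
--     } for k in ok[i:])
--     added.extend({
--         'type': typ, 'name': k, 'action': 'added',
--         'detail': 'New procedure'
--     } for k in nk[j:])
--     return changed + removed + added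
-- ===== Notes on version B (the rewrite author's own statement) =====
-- stated objective: alternative
-- what changed: B replaces A's set algebra (intersection and two set differences, each sorted and scanned separately) by a two-pointer merge walk over the two independently sorted key lists, classifying each key as changed/removed/added during the merge and concatenating the three buckets.
import Mathlib
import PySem

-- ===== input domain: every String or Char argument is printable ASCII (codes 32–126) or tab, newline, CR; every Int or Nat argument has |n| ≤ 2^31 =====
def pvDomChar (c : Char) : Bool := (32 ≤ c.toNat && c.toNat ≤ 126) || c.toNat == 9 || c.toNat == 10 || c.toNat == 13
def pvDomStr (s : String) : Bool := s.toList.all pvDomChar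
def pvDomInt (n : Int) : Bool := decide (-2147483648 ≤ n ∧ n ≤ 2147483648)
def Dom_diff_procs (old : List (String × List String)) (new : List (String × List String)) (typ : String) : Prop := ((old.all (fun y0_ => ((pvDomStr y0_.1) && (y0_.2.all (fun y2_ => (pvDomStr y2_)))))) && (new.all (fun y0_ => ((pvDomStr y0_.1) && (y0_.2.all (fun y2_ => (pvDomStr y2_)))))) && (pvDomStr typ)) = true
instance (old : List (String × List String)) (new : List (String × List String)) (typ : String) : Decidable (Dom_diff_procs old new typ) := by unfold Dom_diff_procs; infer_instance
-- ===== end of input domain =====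

-- B replaces A's set algebra (sorted intersection + two sorted set differences, scanned separately)
-- by a two-pointer merge walk over the two independently sorted key lists (objective: alternative).

-- The record literals (identical in both Pythons)
def pvChanged (typ k : String) : List (String × String) :=
  [("type", typ), ("name", k), ("action", "changed"), ("detail", "Content modified"),
   ("old_name", k), ("new_value", k)]
def pvRemoved (typ k : String) : List (String × String) :=
  [("type", typ), ("name", k), ("action", "removed"), ("detail", "No longer in NASR source"),
   ("old_name", k)]
def pvAdded (typ k : String) : List (String × String) :=
  [("type", typ), ("name", k), ("action", "added"), ("detail", "New procedure")]

-- sorted(old[k]) != sorted(new[k]); old[k] is the first-match association lookup, exact under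
-- Pre_diff_procs (keys are distinct) for the keys k on which both ports evaluate it (k is present).
def pvDiffers (old new : List (String × List String)) (k : String) : Bool :=
  decide (PySem.List.sorted ((old.lookup k).getD []) (fun x => x) false ≠
          PySem.List.sorted ((new.lookup k).getD []) (fun x => x) false)

-- ===== PORT A =====
def diff_procs (old : List (String × List String)) (new : List (String × List String)) (typ : String) : List (List (String × String)) :=
  let changes1 :=
    (PySem.List.sorted (PySem.Set.inter (PySem.Set.ofList (old.map Prod.fst)) (PySem.Set.ofList (new.map Prod.fst))) (fun x => x) false).foldl
      (fun changes k => if pvDiffers old new k then changes ++ [pvChanged typ k] else changes) []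
  let changes2 :=
    (PySem.List.sorted (PySem.Set.diff (PySem.Set.ofList (old.map Prod.fst)) (PySem.Set.ofList (new.map Prod.fst))) (fun x => x) false).foldl
      (fun changes k => changes ++ [pvRemoved typ k]) changes1
  (PySem.List.sorted (PySem.Set.diff (PySem.Set.ofList (new.map Prod.fst)) (PySem.Set.ofList (old.map Prod.fst))) (fun x => x) false).foldl
    (fun changes k => changes ++ [pvAdded typ k]) changes2

-- ===== PORT B =====
-- The while loop with indices i, j becomes the structural recursion consuming the heads of the
-- two sorted key lists; the accumulators are the changed/removed/added buckets; the two
-- trailing extends are the catch-all case (one of the lists is empty).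
def pvMergeDiff (old new : List (String × List String)) (typ : String) :
    List String → List String →
    List (List (String × String)) → List (List (String × String)) → List (List (String × String)) →
    List (List (String × String)) × List (List (String × String)) × List (List (String × String))
  | x :: xs, y :: ys, c, r, a =>
    if x = y then
      pvMergeDiff old new typ xs ys
        (if pvDiffers old new x then c ++ [pvChanged typ x] else c) r a
    else if x < y then
      pvMergeDiff old new typ xs (y :: ys) c (r ++ [pvRemoved typ x]) a
    else
      pvMergeDiff old new typ (x :: xs) ys c r (a ++ [pvAdded typ y])
  | xs, ys, c, r, a => (c, r ++ xs.map (pvRemoved typ), a ++ ys.map (pvAdded typ))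
  termination_by l1 l2 _ _ _ => l1.length + l2.length

def diff_procs_alt (old : List (String × List String)) (new : List (String × List String)) (typ : String) : List (List (String × String)) :=
  let ok := PySem.List.sorted (old.map Prod.fst) (fun x => x) false
  let nk := PySem.List.sorted (new.map Prod.fst) (fun x => x) false
  let res := pvMergeDiff old new typ ok nk [] [] []
  res.1 ++ res.2.1 ++ res.2.2

-- ===== PRECONDITION & SPEC =====
-- Pre_ excludes association lists with duplicate keys: the Python arguments are dicts, which cannot
-- hold a key twice (the dict constructor silently keeps the last value), so the association-list
-- reading of such an input is ambiguous.
def Pre_diff_procs (old : List (String × List String)) (new : List (String × List String)) (typ : String) : Prop :=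
  (old.map Prod.fst).Nodup ∧ (new.map Prod.fst).Nodup
instance (old : List (String × List String)) (new : List (String × List String)) (typ : String) : Decidable (Pre_diff_procs old new typ) := by unfold Pre_diff_procs; infer_instance
def pvWitness_diff_procs : (List (String × List String)) × (List (String × List String)) × String :=
  ([("A", ["x"]), ("B", ["y"])], [("A", ["z"]), ("C", [])], "dp")

def Spec_diff_procs (old : List (String × List String)) (new : List (String × List String)) (typ : String) (out : List (List (String × String))) : Prop := out = diff_procs_alt old new typ
instance (old : List (String × List String)) (new : List (String × List String)) (typ : String) (out : List (List (String × String))) : Decidable (Spec_diff_procs old new typ out) := by unfold Spec_diff_procs; infer_instance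

-- ===== CLAIM (what is proved, stated in full; the proofs are below) =====
def Claim_equal_diff_procs : Prop := ∀ (old : List (String × List String)) (new : List (String × List String)) (typ : String), Dom_diff_procs old new typ → Pre_diff_procs old new typ → Spec_diff_procs old new typ (diff_procs old new typ)

-- ===== LEMMAS AND PROOFS =====

-- The merge walk over two strictly increasing key lists produces the three filtered buckets.
lemma mergeDiff_eq (old new : List (String × List String)) (typ : String) :
    ∀ (l1 l2 : List String) (c r a : List (List (String × String))),
    l1.Pairwise (· < ·) → l2.Pairwise (· < ·) →
    pvMergeDiff old new typ l1 l2 c r a =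
      (c ++ (l1.filter (fun k => l2.contains k && pvDiffers old new k)).map (pvChanged typ),
       r ++ (l1.filter (fun k => !l2.contains k)).map (pvRemoved typ),
       a ++ (l2.filter (fun k => !l1.contains k)).map (pvAdded typ)) := by
  intro l1
  induction l1 with
  | nil =>
    intro l2 c r a _ _
    cases l2 <;> simp [pvMergeDiff]
  | cons x xs ih =>
    intro l2 c r a h1 h2
    induction l2 generalizing c r a with
    | nil => simp [pvMergeDiff]
    | cons y ys ih2 =>
      have hx : ∀ k ∈ xs, x < k := by
        intro k hk; exact (List.pairwise_cons.1 h1).1 k hk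
      have hy : ∀ k ∈ ys, y < k := by
        intro k hk; exact (List.pairwise_cons.1 h2).1 k hk
      by_cases hxy : x = y
      · subst hxy
        rw [pvMergeDiff, if_pos rfl,
          ih ys _ r a (List.pairwise_cons.1 h1).2 (List.pairwise_cons.1 h2).2]
        have e1 : xs.filter (fun k => (x :: ys).contains k && pvDiffers old new k)
            = xs.filter (fun k => ys.contains k && pvDiffers old new k) := by
          apply List.filter_congr
          intro k hk
          have hne : k ≠ x := ne_of_gt (hx k hk)
          simp [hne]
        have e2 : xs.filter (fun k => !(x :: ys).contains k)
            = xs.filter (fun k => !ys.contains k) := by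
          apply List.filter_congr
          intro k hk
          have hne : k ≠ x := ne_of_gt (hx k hk)
          simp [hne]
        have e3 : ys.filter (fun k => !(x :: xs).contains k)
            = ys.filter (fun k => !xs.contains k) := by
          apply List.filter_congr
          intro k hk
          have hne : k ≠ x := ne_of_gt (hy k hk)
          simp [hne]
        have f2 : (x :: xs).filter (fun k => !(x :: ys).contains k)
            = xs.filter (fun k => !ys.contains k) := by
          rw [List.filter_cons, if_neg (by simp), e2]
        have f3 : (x :: ys).filter (fun k => !(x :: xs).contains k)
            = ys.filter (fun k => !xs.contains k) := by
          rw [List.filter_cons, if_neg (by simp), e3]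
        by_cases hd : pvDiffers old new x = true
        · have f1 : (x :: xs).filter (fun k => (x :: ys).contains k && pvDiffers old new k)
              = x :: xs.filter (fun k => ys.contains k && pvDiffers old new k) := by
            rw [List.filter_cons, if_pos (by simp [hd]), e1]
          rw [f1, f2, f3, if_pos hd]
          simp
        · have f1 : (x :: xs).filter (fun k => (x :: ys).contains k && pvDiffers old new k)
              = xs.filter (fun k => ys.contains k && pvDiffers old new k) := by
            rw [List.filter_cons, if_neg (by simp [hd]), e1]
          rw [f1, f2, f3, if_neg hd]
      · by_cases hlt : x < y
        · have hxys : x ∉ ys := fun hk => absurd (lt_trans hlt (hy _ hk)) (lt_irrefl x)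
          rw [pvMergeDiff, if_neg hxy, if_pos hlt,
            ih (y :: ys) c _ a (List.pairwise_cons.1 h1).2 h2]
          have g1 : (x :: xs).filter (fun k => (y :: ys).contains k && pvDiffers old new k)
              = xs.filter (fun k => (y :: ys).contains k && pvDiffers old new k) := by
            rw [List.filter_cons, if_neg (by simp [hxy, hxys])]
          have g2 : (x :: xs).filter (fun k => !(y :: ys).contains k)
              = x :: xs.filter (fun k => !(y :: ys).contains k) := by
            rw [List.filter_cons, if_pos (by simp [hxy, hxys])]
          have g3 : (y :: ys).filter (fun k => !(x :: xs).contains k)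
              = (y :: ys).filter (fun k => !xs.contains k) := by
            apply List.filter_congr
            intro k hk
            have hkx : x < k := by
              rcases List.mem_cons.1 hk with rfl | hk'
              · exact hlt
              · exact lt_trans hlt (hy _ hk')
            have hne : k ≠ x := ne_of_gt hkx
            simp [hne]
          rw [g1, g2, g3]
          simp
        · have hgt : y < x := lt_of_le_of_ne (le_of_not_gt hlt) (Ne.symm hxy)
          have hyx : ¬ y = x := ne_of_lt hgt
          have hyxs : y ∉ xs := fun hk => absurd (lt_trans hgt (hx _ hk)) (lt_irrefl y)
          rw [pvMergeDiff, if_neg hxy, if_neg hlt,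
            ih2 c r _ (List.pairwise_cons.1 h2).2]
          have e1 : (x :: xs).filter (fun k => (y :: ys).contains k && pvDiffers old new k)
              = (x :: xs).filter (fun k => ys.contains k && pvDiffers old new k) := by
            apply List.filter_congr
            intro k hk
            have hky : y < k := by
              rcases List.mem_cons.1 hk with rfl | hk'
              · exact hgt
              · exact lt_trans hgt (hx _ hk')
            have hne : k ≠ y := ne_of_gt hky
            simp [hne]
          have e2 : (x :: xs).filter (fun k => !(y :: ys).contains k)
              = (x :: xs).filter (fun k => !ys.contains k) := by
            apply List.filter_congr
            intro k hk
            have hky : y < k := by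
              rcases List.mem_cons.1 hk with rfl | hk'
              · exact hgt
              · exact lt_trans hgt (hx _ hk')
            have hne : k ≠ y := ne_of_gt hky
            simp [hne]
          have h3 : (y :: ys).filter (fun k => !(x :: xs).contains k)
              = y :: ys.filter (fun k => !(x :: xs).contains k) := by
            rw [List.filter_cons, if_pos (by simp [hyx, hyxs])]
          rw [e1, e2, h3]
          simp
-- filtering a sorted Nodup list is sorting the corresponding sub-set
lemma sorted_filter_eq (u v : List String) (p : String → Bool)
    (hu : u.Nodup) (hv : v.Nodup)
    (hmem : ∀ k, k ∈ v ↔ k ∈ u ∧ p k = true) :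
    (PySem.List.sorted u (fun x => x) false).filter p = PySem.List.sorted v (fun x => x) false := by
  symm
  apply PySem.List.sorted_eq_of_perm_of_pairwise_lt
  · have hsu : (PySem.List.sorted u (fun x => x) false).Nodup :=
      ((PySem.List.sorted_perm u (fun x => x) false).symm).nodup hu
    rw [List.perm_ext_iff_of_nodup (hsu.filter p) hv]
    intro k
    simp only [List.mem_filter, hmem k,
      (PySem.List.sorted_perm u (fun x => x) false).mem_iff]
  · have hle := PySem.List.sorted_pairwise u (fun x => x)
    have hne : (PySem.List.sorted u (fun x => x) false).Nodup :=
      ((PySem.List.sorted_perm u (fun x => x) false).symm).nodup hu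
    exact ((hle.and hne).imp (fun h => lt_of_le_of_ne h.1 h.2)).filter p

lemma sorted_pairwise_lt (u : List String) (hu : u.Nodup) :
    (PySem.List.sorted u (fun x => x) false).Pairwise (· < ·) := by
  have hle := PySem.List.sorted_pairwise u (fun x => x)
  have hne : (PySem.List.sorted u (fun x => x) false).Nodup :=
    ((PySem.List.sorted_perm u (fun x => x) false).symm).nodup hu
  exact (hle.and hne).imp (fun h => lt_of_le_of_ne h.1 h.2)

-- ===== VERDICT (by name: the statement is the Claim_ definition above) =====
theorem diff_procs_spec : Claim_equal_diff_procs := by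
  intro old new typ _ hpre
  obtain ⟨hO, hN⟩ := hpre
  unfold Spec_diff_procs diff_procs diff_procs_alt
  simp only []
  rw [mergeDiff_eq old new typ _ _ [] [] []
        (sorted_pairwise_lt _ hO) (sorted_pairwise_lt _ hN)]
  simp only [PySem.List.foldl_append_if, PySem.List.foldl_append_singleton_eq_map,
    List.nil_append]
  have hOs : (PySem.Set.ofList (old.map Prod.fst)).Nodup := PySem.Set.nodup_ofList _
  have hNs : (PySem.Set.ofList (new.map Prod.fst)).Nodup := PySem.Set.nodup_ofList _
  have memS : ∀ (l : List String) (k : String),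
      (PySem.List.sorted l (fun x => x) false).contains k = true ↔ k ∈ l := by
    intro l k
    simp [List.contains_iff_mem, (PySem.List.sorted_perm l (fun x => x) false).mem_iff]
  rw [sorted_filter_eq (old.map Prod.fst)
        ((PySem.Set.inter (PySem.Set.ofList (old.map Prod.fst)) (PySem.Set.ofList (new.map Prod.fst))).filter (pvDiffers old new)) _
        hO ((PySem.Set.nodup_inter _ _ hOs).filter _) ?b1,
      sorted_filter_eq (old.map Prod.fst)
        (PySem.Set.diff (PySem.Set.ofList (old.map Prod.fst)) (PySem.Set.ofList (new.map Prod.fst))) _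
        hO (PySem.Set.nodup_diff _ _ hOs) ?b2,
      sorted_filter_eq (new.map Prod.fst)
        (PySem.Set.diff (PySem.Set.ofList (new.map Prod.fst)) (PySem.Set.ofList (old.map Prod.fst))) _
        hN (PySem.Set.nodup_diff _ _ hNs) ?b3,
      ← sorted_filter_eq (PySem.Set.inter (PySem.Set.ofList (old.map Prod.fst)) (PySem.Set.ofList (new.map Prod.fst)))
        ((PySem.Set.inter (PySem.Set.ofList (old.map Prod.fst)) (PySem.Set.ofList (new.map Prod.fst))).filter (pvDiffers old new)) (pvDiffers old new)
        (PySem.Set.nodup_inter _ _ hOs) ((PySem.Set.nodup_inter _ _ hOs).filter _) ?a4]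
  case b1 =>
    intro k
    simp [List.mem_filter, PySem.Set.mem_inter, PySem.Set.mem_ofList, memS]
    tauto
  case b2 =>
    intro k
    simp [PySem.Set.mem_diff, PySem.Set.mem_ofList, memS]
  case b3 =>
    intro k
    simp [PySem.Set.mem_diff, PySem.Set.mem_ofList, memS]
  case a4 =>
    intro k
    simp [List.mem_filter, PySem.Set.mem_inter]
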